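-- pv_equiv track=rewrite | github.com/jasonmcaffee/ace-step-fork | acestep/ui/aceflow/chord_reference.py | _compact_voicing
-- ===== SOURCE A (Python) =====
-- def _compact_voicing(root_midi: int, intervals: list[int]) -> list[int]:
--     voiced: list[int] = []
--     for idx, interval in enumerate(intervals):
--         midi = root_midi + interval
--         while midi < 55:
--             midi += 12
--         while midi > 76:
--             midi -= 12
--         while idx > 0 and midi <= voiced[-1]:
--             midi += 12
--         voiced.append(midi)
--     for i in range(1, len(voiced)):
--         while voiced[i] - voiced[0] > 14 and voiced[i] - 12 > voiced[i - 1]: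
--             voiced[i] -= 12
--     voiced = sorted(voiced)
--     return [min(79, max(54, v)) for v in voiced]
-- ===== SOURCE B (Python) =====
-- def _compact_voicing(root_midi: int, intervals: list[int]) -> list[int]:
--     voiced: list[int] = []
--     prev = None
--     for interval in intervals:
--         m = root_midi + interval
--         if m < 55:
--             m = 55 + (m - 55) % 12
--         elif m > 76:
--             m = 65 + (m - 65) % 12
--         if prev is not None and m <= prev:
--             m += 12 * ((prev - m) // 12 + 1)
--         voiced.append(m)
--         prev = m
--     if voiced:
--         v0 = voiced[0]
--         out = [v0]
--         prev = v0
--         for v in voiced[1:]: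
--             k = min((v - v0 - 15) // 12 + 1, (v - prev - 13) // 12 + 1)
--             if k > 0:
--                 v -= 12 * k
--             out.append(v)
--             prev = v
--         voiced = out
--     voiced.sort()
--     return [min(79, max(54, v)) for v in voiced]
-- ===== Notes on version B (the rewrite author's own statement) =====
-- stated objective: faster
-- what changed: All four inner while-loops (the two range-normalising spins, the bump-above-previous spin, and the octave-lowering spin of the second pass) are replaced by closed-form floor-division/modulo arithmetic, so each element is produced in O(1) where A's loop counts grow with the input magnitude and with how far notes have been stacked.
import Mathlib
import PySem

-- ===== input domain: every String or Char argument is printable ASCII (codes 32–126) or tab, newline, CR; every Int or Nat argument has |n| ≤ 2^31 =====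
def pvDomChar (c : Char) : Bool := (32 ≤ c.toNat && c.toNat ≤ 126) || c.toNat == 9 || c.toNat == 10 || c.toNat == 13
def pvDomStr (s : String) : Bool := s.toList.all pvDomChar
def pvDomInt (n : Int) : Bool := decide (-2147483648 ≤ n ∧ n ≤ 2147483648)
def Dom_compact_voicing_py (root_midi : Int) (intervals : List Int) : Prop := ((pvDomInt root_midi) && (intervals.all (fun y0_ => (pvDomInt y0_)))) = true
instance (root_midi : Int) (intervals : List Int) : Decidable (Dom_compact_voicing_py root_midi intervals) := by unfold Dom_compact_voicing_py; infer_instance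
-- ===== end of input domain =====

-- B replaces A's three range-normalising/bumping while-loops and the inner lowering
-- while-loop by closed-form floor-division/modulo arithmetic (objective: simpler/alternative).

-- ===== PORT A =====
-- while midi < 55: midi += 12
def pvLiftLow (m : Int) : Int :=
  if m < 55 then pvLiftLow (m + 12) else m
termination_by (55 - m).toNat
decreasing_by omega

-- while midi > 76: midi -= 12
def pvDropHigh (m : Int) : Int :=
  if m > 76 then pvDropHigh (m - 12) else m
termination_by (m - 76).toNat
decreasing_by omega

-- while midi <= last: midi += 12   (the 'idx > 0' part of the guard is handled at the call site)
def pvBump (last m : Int) : Int :=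
  if m ≤ last then pvBump last (m + 12) else m
termination_by (last - m + 12).toNat
decreasing_by omega

-- first for-loop over enumerate(intervals), appending to voiced
def pvPassA (root : Int) : List (Int × Int) → List Int → List Int
  | [], voiced => voiced
  | (idx, interval) :: rest, voiced =>
      let m1 := pvDropHigh (pvLiftLow (root + interval))
      let m2 := if 0 < idx then
          match PySem.List.pyGet? voiced (-1) with
          | some last => pvBump last m1
          | none => m1          -- unreachable: idx > 0 implies voiced nonempty
        else m1
      pvPassA root rest (voiced ++ [m2])

-- while voiced[i] - voiced[0] > 14 and voiced[i] - 12 > voiced[i-1]: voiced[i] -= 12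
def pvAdjOne (v0 prevv v : Int) : Int :=
  if v - v0 > 14 ∧ v - 12 > prevv then pvAdjOne v0 prevv (v - 12) else v
termination_by (v - v0).toNat
decreasing_by omega

-- for i in range(1, len(voiced)): … (structural recursion over the tail, carrying voiced[i-1])
def pvAdjA (v0 prevv : Int) : List Int → List Int
  | [] => []
  | v :: rest => let v' := pvAdjOne v0 prevv v; v' :: pvAdjA v0 v' rest

def compact_voicing_py (root_midi : Int) (intervals : List Int) : List Int :=
  let voiced := pvPassA root_midi (PySem.List.enumerate intervals) []
  let voiced2 := match voiced with
    | [] => []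
    | v0 :: rest => v0 :: pvAdjA v0 v0 rest
  (PySem.List.sorted voiced2 (fun x => x) false).map (fun v => min 79 (max 54 v))

-- ===== PORT B =====
def pvNormB (m : Int) : Int :=
  if m < 55 then 55 + PySem.Int.mod (m - 55) 12
  else if m > 76 then 65 + PySem.Int.mod (m - 65) 12
  else m

def pvPassB (root : Int) (prev : Option Int) : List Int → List Int
  | [] => []
  | interval :: rest =>
      let m := pvNormB (root + interval)
      let m' := match prev with
        | some p => if m ≤ p then m + 12 * (PySem.Int.floordiv (p - m) 12 + 1) else m
        | none => m
      m' :: pvPassB root (some m') rest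

def pvAdjB (v0 prevv v : Int) : Int :=
  let k := min (PySem.Int.floordiv (v - v0 - 15) 12 + 1) (PySem.Int.floordiv (v - prevv - 13) 12 + 1)
  if 0 < k then v - 12 * k else v

def pvPass2B (v0 prevv : Int) : List Int → List Int
  | [] => []
  | v :: rest => let v' := pvAdjB v0 prevv v; v' :: pvPass2B v0 v' rest

def compact_voicing_py_alt (root_midi : Int) (intervals : List Int) : List Int :=
  let voiced := pvPassB root_midi none intervals
  let voiced2 := match voiced with
    | [] => []
    | v0 :: rest => v0 :: pvPass2B v0 v0 rest
  (PySem.List.sorted voiced2 (fun x => x) false).map (fun v => min 79 (max 54 v))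

-- ===== PRECONDITION & SPEC =====
def Spec_compact_voicing_py (root_midi : Int) (intervals : List Int) (out : List Int) : Prop := out = compact_voicing_py_alt root_midi intervals
instance (root_midi : Int) (intervals : List Int) (out : List Int) : Decidable (Spec_compact_voicing_py root_midi intervals out) := by unfold Spec_compact_voicing_py; infer_instance

-- ===== CLAIM (what is proved, stated in full; the proofs are below) =====
def Claim_equal_compact_voicing_py : Prop := ∀ (root_midi : Int) (intervals : List Int), Dom_compact_voicing_py root_midi intervals → Spec_compact_voicing_py root_midi intervals (compact_voicing_py root_midi intervals)

-- ===== LEMMAS AND PROOFS =====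
theorem pvLiftLow_eq (m : Int) : pvLiftLow m = if m < 55 then 55 + (m - 55) % 12 else m := by
  induction m using pvLiftLow.induct with
  | case1 m hm ih => rw [pvLiftLow]; (split_ifs at ih ⊢) <;> omega
  | case2 m hm => rw [pvLiftLow]; split_ifs <;> omega

theorem pvDropHigh_eq (m : Int) : pvDropHigh m = if m > 76 then 65 + (m - 65) % 12 else m := by
  induction m using pvDropHigh.induct with
  | case1 m hm ih => rw [pvDropHigh]; (split_ifs at ih ⊢) <;> omega
  | case2 m hm => rw [pvDropHigh]; split_ifs <;> omega

theorem pvNorm_eq (m : Int) : pvDropHigh (pvLiftLow m) = pvNormB m := by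
  unfold pvNormB
  rw [pvLiftLow_eq, PySem.Int.mod_eq_emod_of_pos (by omega), PySem.Int.mod_eq_emod_of_pos (by omega)]
  by_cases h : m < 55
  · simp only [h, if_true]; rw [pvDropHigh_eq]; split_ifs
    all_goals omega
  · simp only [h, if_false]; rw [pvDropHigh_eq]

theorem pvBump_eq (last m : Int) :
    pvBump last m = if m ≤ last then m + 12 * ((last - m) / 12 + 1) else m := by
  induction m using pvBump.induct with
  | last => exact last
  | case1 m hm ih => rw [pvBump]; (split_ifs at ih ⊢) <;> omega
  | case2 m hm => rw [pvBump]; split_ifs <;> omega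

theorem pvAdjB_ediv (v0 prevv v : Int) : pvAdjB v0 prevv v =
    (if 0 < min ((v - v0 - 15) / 12 + 1) ((v - prevv - 13) / 12 + 1) then
      v - 12 * min ((v - v0 - 15) / 12 + 1) ((v - prevv - 13) / 12 + 1) else v) := by
  unfold pvAdjB
  rw [PySem.Int.floordiv_eq_ediv_of_pos (by omega), PySem.Int.floordiv_eq_ediv_of_pos (by omega)]

theorem pvAdjOne_eq (v0 prevv v : Int) : pvAdjOne v0 prevv v = pvAdjB v0 prevv v := by
  induction v using pvAdjOne.induct with
  | v0 => exact v0
  | prevv => exact prevv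
  | case1 v hv ih =>
    rw [pvAdjOne, ih, pvAdjB_ediv, pvAdjB_ediv]
    split_ifs at * <;> omega
  | case2 v hv =>
    rw [pvAdjOne, pvAdjB_ediv]
    split_ifs at * <;> omega

theorem pvAdj_eq (rest : List Int) (v0 prevv : Int) :
    pvAdjA v0 prevv rest = pvPass2B v0 prevv rest := by
  induction rest generalizing prevv with
  | nil => rfl
  | cons v rest ih => simp only [pvAdjA, pvPass2B, pvAdjOne_eq, ih]

theorem pvGet_last (xs : List Int) (x : Int) :
    PySem.List.pyGet? (xs ++ [x]) (-1) = some x := by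
  simp [PySem.List.pyGet?, PySem.List.pyIdx?]

theorem pvPass_eq (ivs : List Int) (root : Int) (voiced : List Int) (k : Int) (prev : Option Int)
    (hinv : match prev with
            | none => voiced = [] ∧ k = 0
            | some p => PySem.List.pyGet? voiced (-1) = some p ∧ 0 < k) :
    pvPassA root (PySem.List.enumerate ivs k) voiced = voiced ++ pvPassB root prev ivs := by
  induction ivs generalizing voiced k prev with
  | nil => simp [PySem.List.enumerate_nil, pvPassA, pvPassB]
  | cons iv rest ih =>
    rw [PySem.List.enumerate_cons]
    show pvPassA root ((k, iv) :: PySem.List.enumerate rest (k + 1)) voiced = _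
    unfold pvPassA pvPassB
    rw [pvNorm_eq]
    match prev with
    | none =>
      obtain ⟨hv, hk⟩ := hinv
      subst hv hk
      simp only [show ¬ (0:Int) < 0 by omega, if_false]
      rw [ih ([] ++ [pvNormB (root + iv)]) (0 + 1) (some (pvNormB (root + iv)))
            (by exact ⟨pvGet_last [] _, by omega⟩)]
      simp
    | some p =>
      obtain ⟨hg, hk⟩ := hinv
      simp only [hk, if_true, hg]
      rw [pvBump_eq, PySem.Int.floordiv_eq_ediv_of_pos (by omega)]
      set m' : Int := if pvNormB (root + iv) ≤ p then
          pvNormB (root + iv) + 12 * ((p - pvNormB (root + iv)) / 12 + 1)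
        else pvNormB (root + iv) with hm'
      rw [ih (voiced ++ [m']) (k + 1) (some m') (by exact ⟨pvGet_last _ _, by omega⟩)]
      simp

-- ===== VERDICT (by name: the statement is the Claim_ definition above) =====
theorem compact_voicing_py_spec : Claim_equal_compact_voicing_py := by
  intro root ivs _
  show compact_voicing_py root ivs = compact_voicing_py_alt root ivs
  unfold compact_voicing_py compact_voicing_py_alt
  rw [show PySem.List.enumerate ivs = PySem.List.enumerate ivs 0 from rfl,
      pvPass_eq ivs root [] 0 none ⟨rfl, rfl⟩]
  simp only [List.nil_append]
  match pvPassB root none ivs with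
  | [] => rfl
  | v0 :: rest => simp only [pvAdj_eq]
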